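-- pv_equiv track=rewrite | github.com/VSJMilewski/multimodal-probes | probing_project/data/modules/base_module.py | _match_tokenized_to_untokenized
-- ===== SOURCE A (Python) =====
-- from collections import defaultdict
-- from typing import Dict, List, Optional, Union
--
-- def _match_tokenized_to_untokenized(
--     tokenized_sent: List[str], untokenized_sent: List[str]
-- ) -> Dict:
--     """Aligns tokenized and untokenized sentence given subwords "##" prefixed
--
--     Assuming that each subword token that does not start a new word is prefixed
--     by two hashes, "##", computes an alignment between the un-subword-tokenized
--     and subword-tokenized sentences.
--
--     Args:
--         tokenized_sent: a list of strings describing a subword-tokenized sentence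
--         untokenized_sent: a list of strings describing a sentence, no subword tok.
--
--     Returns: A dictionary of type {int: list(int)} mapping each untokenized sentence
--              index to a list of subword-tokenized sentence indices
--     """
--     mapping = defaultdict(list)
--     untokenized_sent_index = 0
--     tokenized_sent_index = 1
--     # while we haven't reached the last token in untokenized or tokenized
--     while untokenized_sent_index < len(
--         untokenized_sent
--     ) and tokenized_sent_index < len(tokenized_sent):
--         # find all the sub tokens of the current word.
--         # So each untokenized index can have a list of multiple tokenized indices
--         while tokenized_sent_index + 1 < len(tokenized_sent) and tokenized_sent[
--             tokenized_sent_index + 1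
--         ].startswith("##"):
--             mapping[untokenized_sent_index].append(tokenized_sent_index)
--             tokenized_sent_index += 1
--         mapping[untokenized_sent_index].append(tokenized_sent_index)
--         untokenized_sent_index += 1
--         tokenized_sent_index += 1
--     return mapping
-- ===== SOURCE B (Python) =====
-- from collections import defaultdict
-- from typing import Dict, List
--
-- def _match_tokenized_to_untokenized(
--     tokenized_sent: List[str], untokenized_sent: List[str]
-- ) -> Dict:
--     """Single flat pass: a token starts a new word iff it is the first scanned
--     token (index 1) or does not carry the '##' continuation prefix; keep a
--     running word counter instead of the nested lookahead while-loops."""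
--     mapping = defaultdict(list)
--     untok_index = -1
--     for j in range(1, len(tokenized_sent)):
--         if j == 1 or not tokenized_sent[j].startswith("##"):
--             untok_index += 1
--             if untok_index >= len(untokenized_sent):
--                 break
--         mapping[untok_index].append(j)
--     return mapping
-- ===== Notes on version B (the rewrite author's own statement) =====
-- stated objective: simpler
-- what changed: Replaced the nested while-loops with next-token ('##') lookahead by one flat pass over token indices that detects word starts from the current token's own '##' prefix and maintains a running word counter.
import Mathlib
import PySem

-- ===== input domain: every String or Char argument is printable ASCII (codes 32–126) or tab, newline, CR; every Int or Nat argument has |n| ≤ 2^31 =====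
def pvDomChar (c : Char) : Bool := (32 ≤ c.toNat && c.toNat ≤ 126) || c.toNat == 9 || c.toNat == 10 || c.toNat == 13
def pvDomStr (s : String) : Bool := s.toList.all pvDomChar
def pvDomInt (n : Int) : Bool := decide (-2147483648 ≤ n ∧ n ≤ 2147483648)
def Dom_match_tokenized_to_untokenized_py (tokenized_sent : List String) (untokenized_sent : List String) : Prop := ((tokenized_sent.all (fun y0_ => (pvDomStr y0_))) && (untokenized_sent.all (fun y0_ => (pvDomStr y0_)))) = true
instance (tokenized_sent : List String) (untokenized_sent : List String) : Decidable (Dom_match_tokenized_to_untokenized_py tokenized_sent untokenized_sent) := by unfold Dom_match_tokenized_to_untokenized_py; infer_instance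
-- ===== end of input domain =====

-- B replaces A's nested while-loops (lookahead on the NEXT token's '##' prefix) by one flat
-- pass that detects word starts from the CURRENT token's '##' prefix with a running word
-- counter; same return value, objective: simpler.
-- Both loop ports carry a structural fuel argument, started at tokenized_sent.length; each
-- loop advances its token index by one per iteration, so this fuel is never exhausted and
-- the ports compute exactly what their Pythons compute.

-- ===== PORT A =====
-- inner while: collect sub-tokens while the NEXT token starts with "##"
def pvAInner (tok : List String) (u : Int) :
    Nat → PySem.Dict Int (List Int) → Nat → PySem.Dict Int (List Int) × Nat
  | 0, m, t => (m, t)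
  | fuel+1, m, t =>
    if t + 1 < tok.length ∧ PySem.Str.startswith (tok.getD (t+1) "") "##" = true then
      pvAInner tok u fuel (m.modify u [] (fun l => l ++ [(t : Int)])) (t+1)
    else (m, t)

-- outer while
def pvAOuter (tok untok : List String) :
    Nat → PySem.Dict Int (List Int) → Int → Nat → PySem.Dict Int (List Int)
  | 0, m, _, _ => m
  | fuel+1, m, u, t =>
    if u < (untok.length : Int) ∧ t < tok.length then
      let r := pvAInner tok u tok.length m t
      pvAOuter tok untok fuel (r.1.modify u [] (fun l => l ++ [(r.2 : Int)])) (u+1) (r.2+1)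
    else m

def match_tokenized_to_untokenized_py (tokenized_sent : List String) (untokenized_sent : List String) : List (Int × List Int) :=
  (pvAOuter tokenized_sent untokenized_sent tokenized_sent.length PySem.Dict.empty 0 1).items

-- ===== PORT B =====
-- flat loop over j = 1 .. len(tok)-1 with a running word counter and early break
def pvBLoop (tok untok : List String) :
    Nat → PySem.Dict Int (List Int) → Int → Nat → PySem.Dict Int (List Int)
  | 0, m, _, _ => m
  | fuel+1, m, ui, j =>
    if j < tok.length then
      if j = 1 ∨ PySem.Str.startswith (tok.getD j "") "##" = false then
        if (untok.length : Int) ≤ ui + 1 then m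
        else pvBLoop tok untok fuel (m.modify (ui+1) [] (fun l => l ++ [(j : Int)])) (ui+1) (j+1)
      else pvBLoop tok untok fuel (m.modify ui [] (fun l => l ++ [(j : Int)])) ui (j+1)
    else m

def match_tokenized_to_untokenized_py_alt (tokenized_sent : List String) (untokenized_sent : List String) : List (Int × List Int) :=
  (pvBLoop tokenized_sent untokenized_sent tokenized_sent.length PySem.Dict.empty (-1) 1).items

-- ===== PRECONDITION & SPEC =====
def Spec_match_tokenized_to_untokenized_py (tokenized_sent : List String) (untokenized_sent : List String) (out : List (Int × List Int)) : Prop := out = match_tokenized_to_untokenized_py_alt tokenized_sent untokenized_sent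
instance (tokenized_sent : List String) (untokenized_sent : List String) (out : List (Int × List Int)) : Decidable (Spec_match_tokenized_to_untokenized_py tokenized_sent untokenized_sent out) := by unfold Spec_match_tokenized_to_untokenized_py; infer_instance

-- ===== CLAIM (what is proved, stated in full; the proofs are below) =====
def Claim_equal_match_tokenized_to_untokenized_py : Prop := ∀ (tokenized_sent : List String) (untokenized_sent : List String), Dom_match_tokenized_to_untokenized_py tokenized_sent untokenized_sent → Spec_match_tokenized_to_untokenized_py tokenized_sent untokenized_sent (match_tokenized_to_untokenized_py tokenized_sent untokenized_sent)

-- ===== LEMMAS AND PROOFS =====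

-- B's loop returns its accumulator unchanged once the token index leaves the list
lemma pvB_stop (tok untok : List String) (f : Nat) (m : PySem.Dict Int (List Int))
    (ui : Int) (j : Nat) (h : ¬ j < tok.length) :
    pvBLoop tok untok f m ui j = m := by
  cases f <;> simp [pvBLoop, h]

-- B's loop breaks (returning the accumulator) at a word start once the words are used up
lemma pvB_break (tok untok : List String) (f : Nat) (m : PySem.Dict Int (List Int))
    (ui : Int) (j : Nat) (h : j < tok.length)
    (hws : j = 1 ∨ PySem.Str.startswith (tok.getD j "") "##" = false)
    (hbr : (untok.length : Int) ≤ ui + 1) :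
    pvBLoop tok untok f m ui j = m := by
  cases f with
  | zero => rfl
  | succ f => simp only [pvBLoop]; rw [if_pos h, if_pos hws, if_pos hbr]

-- one step of B's loop at a word start, words remaining
lemma pvB_word (tok untok : List String) (f : Nat) (m : PySem.Dict Int (List Int))
    (ui : Int) (j : Nat) (h : j < tok.length)
    (hws : j = 1 ∨ PySem.Str.startswith (tok.getD j "") "##" = false)
    (hbr : ¬ (untok.length : Int) ≤ ui + 1) :
    pvBLoop tok untok (f+1) m ui j
      = pvBLoop tok untok f (m.modify (ui+1) [] (fun l => l ++ [(j : Int)])) (ui+1) (j+1) := by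
  simp only [pvBLoop]; rw [if_pos h, if_pos hws, if_neg hbr]

-- one step of B's loop at a continuation ('##') token
lemma pvB_cont (tok untok : List String) (f : Nat) (m : PySem.Dict Int (List Int))
    (ui : Int) (j : Nat) (h : j < tok.length)
    (hnws : ¬ (j = 1 ∨ PySem.Str.startswith (tok.getD j "") "##" = false)) :
    pvBLoop tok untok (f+1) m ui j
      = pvBLoop tok untok f (m.modify ui [] (fun l => l ++ [(j : Int)])) ui (j+1) := by
  simp only [pvBLoop]; rw [if_pos h, if_neg hnws]

-- any sufficient fuel computes the same value of B's loop
lemma pvB_fuel (tok untok : List String) :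
    ∀ f g m (ui : Int) (j : Nat), tok.length - j ≤ f → tok.length - j ≤ g →
      pvBLoop tok untok f m ui j = pvBLoop tok untok g m ui j := by
  intro f
  induction f with
  | zero =>
    intro g m ui j hf hg
    rw [pvB_stop tok untok 0 m ui j (by omega), pvB_stop tok untok g m ui j (by omega)]
  | succ f ih =>
    intro g m ui j hf hg
    by_cases hj : j < tok.length
    · obtain ⟨g', rfl⟩ : ∃ g', g = g' + 1 := ⟨g - 1, by omega⟩
      by_cases hws : j = 1 ∨ PySem.Str.startswith (tok.getD j "") "##" = false
      · by_cases hbr : (untok.length : Int) ≤ ui + 1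
        · rw [pvB_break tok untok (f+1) m ui j hj hws hbr,
              pvB_break tok untok (g'+1) m ui j hj hws hbr]
        · rw [pvB_word tok untok f m ui j hj hws hbr,
              pvB_word tok untok g' m ui j hj hws hbr]
          exact ih g' _ _ _ (by omega) (by omega)
      · rw [pvB_cont tok untok f m ui j hj hws, pvB_cont tok untok g' m ui j hj hws]
        exact ih g' _ _ _ (by omega) (by omega)
    · rw [pvB_stop tok untok (f+1) m ui j hj, pvB_stop tok untok g m ui j hj]

-- A's inner loop never moves the token index backwards
lemma pvAInner_ge (tok : List String) (u : Int) :
    ∀ f m t, t ≤ (pvAInner tok u f m t).2 := by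
  intro f
  induction f with
  | zero => intro m t; rfl
  | succ f ih =>
    intro m t
    by_cases h : t + 1 < tok.length ∧ PySem.Str.startswith (tok.getD (t+1) "") "##" = true
    · rw [pvAInner, if_pos h]
      have := ih (m.modify u [] (fun l => l ++ [(t : Int)])) (t+1)
      omega
    · rw [pvAInner, if_neg h]

-- with sufficient fuel, A's inner loop stops exactly when the next token is no continuation
lemma pvAInner_stop (tok : List String) (u : Int) :
    ∀ f m t, tok.length ≤ f + t + 1 →
      ¬ ((pvAInner tok u f m t).2 + 1 < tok.length ∧
         PySem.Str.startswith (tok.getD ((pvAInner tok u f m t).2 + 1) "") "##" = true) := by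
  intro f
  induction f with
  | zero =>
    intro m t hf
    show ¬ (t + 1 < tok.length ∧ _)
    omega
  | succ f ih =>
    intro m t hf
    by_cases h : t + 1 < tok.length ∧ PySem.Str.startswith (tok.getD (t+1) "") "##" = true
    · rw [pvAInner, if_pos h]
      exact ih (m.modify u [] (fun l => l ++ [(t : Int)])) (t+1) (by omega)
    · rw [pvAInner, if_neg h]
      exact h

-- B's flat pass over one word's token run agrees with A's inner loop followed by A's append
lemma pv_run (tok untok : List String) (u : Int) :
    ∀ f t m, tok.length ≤ f + t + 1 → 1 ≤ t →
      pvBLoop tok untok tok.length (m.modify u [] (fun l => l ++ [(t : Int)])) u (t+1)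
        = pvBLoop tok untok tok.length
            ((pvAInner tok u f m t).1.modify u [] (fun l => l ++ [((pvAInner tok u f m t).2 : Int)]))
            u ((pvAInner tok u f m t).2 + 1) := by
  intro f
  induction f with
  | zero => intro t m hf h1; rfl
  | succ f ih =>
    intro t m hf h1
    by_cases h : t + 1 < tok.length ∧ PySem.Str.startswith (tok.getD (t+1) "") "##" = true
    · rw [pvAInner, if_pos h]
      have hnws : ¬ (t + 1 = 1 ∨ PySem.Str.startswith (tok.getD (t+1) "") "##" = false) := by
        push Not
        exact ⟨by omega, by simpa using h.2⟩
      obtain ⟨L', hL⟩ : ∃ L', tok.length = L' + 1 := ⟨tok.length - 1, by omega⟩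
      calc pvBLoop tok untok tok.length (m.modify u [] (fun l => l ++ [(t : Int)])) u (t+1)
          = pvBLoop tok untok L'
              ((m.modify u [] (fun l => l ++ [(t : Int)])).modify u [] (fun l => l ++ [((t+1 : Nat) : Int)]))
              u (t+1+1) := by
            rw [hL]; exact pvB_cont tok untok L' _ u (t+1) (by omega) hnws
        _ = pvBLoop tok untok tok.length
              ((m.modify u [] (fun l => l ++ [(t : Int)])).modify u [] (fun l => l ++ [((t+1 : Nat) : Int)]))
              u (t+1+1) := pvB_fuel tok untok L' tok.length _ u (t+1+1) (by omega) (by omega)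
        _ = _ := ih (t+1) (m.modify u [] (fun l => l ++ [(t : Int)])) (by omega) (by omega)
    · rw [pvAInner, if_neg h]

-- A's outer loop at a word start equals B's flat loop (whose word counter trails A's by one)
lemma pv_both (tok untok : List String) :
    ∀ f t (u : Int) m, tok.length - t ≤ f → 1 ≤ t →
      (t = 1 ∨ PySem.Str.startswith (tok.getD t "") "##" = false) →
      pvAOuter tok untok f m u t = pvBLoop tok untok tok.length m (u - 1) t := by
  intro f
  induction f with
  | zero =>
    intro t u m hf h1 hws
    rw [pvB_stop tok untok tok.length m (u-1) t (by omega)]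
    rfl
  | succ f ih =>
    intro t u m hf h1 hws
    by_cases h : u < (untok.length : Int) ∧ t < tok.length
    · have hge : t ≤ (pvAInner tok u tok.length m t).2 := pvAInner_ge tok u tok.length m t
      have hstop := pvAInner_stop tok u tok.length m t (by omega)
      rw [pvAOuter, if_pos h]
      have hws' : (pvAInner tok u tok.length m t).2 + 1 = 1 ∨
          PySem.Str.startswith (tok.getD ((pvAInner tok u tok.length m t).2 + 1) "") "##" = false := by
        by_cases hr : (pvAInner tok u tok.length m t).2 + 1 < tok.length
        · right
          rcases hsw : PySem.Str.startswith (tok.getD ((pvAInner tok u tok.length m t).2 + 1) "") "##" with _ | _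
          · rfl
          · exact absurd ⟨hr, hsw⟩ hstop
        · right
          rw [List.getD_eq_default _ _ (by omega)]
          decide
      obtain ⟨L', hL⟩ : ∃ L', tok.length = L' + 1 := ⟨tok.length - 1, by omega⟩
      have hu1 : u - 1 + 1 = u := by ring
      calc pvAOuter tok untok f
              ((pvAInner tok u tok.length m t).1.modify u [] (fun l => l ++ [((pvAInner tok u tok.length m t).2 : Int)]))
              (u+1) ((pvAInner tok u tok.length m t).2 + 1)
          = pvBLoop tok untok tok.length
              ((pvAInner tok u tok.length m t).1.modify u [] (fun l => l ++ [((pvAInner tok u tok.length m t).2 : Int)]))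
              (u + 1 - 1) ((pvAInner tok u tok.length m t).2 + 1) :=
            ih _ (u+1) _ (by omega) (by omega) hws'
        _ = pvBLoop tok untok tok.length
              (m.modify u [] (fun l => l ++ [(t : Int)])) u (t+1) := by
            rw [show u + 1 - 1 = u from by ring,
                ← pv_run tok untok u tok.length t m (by omega) h1]
        _ = pvBLoop tok untok L'
              (m.modify u [] (fun l => l ++ [(t : Int)])) u (t+1) :=
            pvB_fuel tok untok tok.length L' _ u (t+1) (by omega) (by omega)
        _ = pvBLoop tok untok tok.length m (u - 1) t := by
            rw [hL, pvB_word tok untok L' m (u-1) t h.2 hws (by omega), hu1]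
    · rw [pvAOuter, if_neg h]
      by_cases ht : t < tok.length
      · have hu : (untok.length : Int) ≤ u := by
          by_contra hlt
          exact h ⟨by omega, ht⟩
        rw [pvB_break tok untok tok.length m (u-1) t ht hws (by omega)]
      · rw [pvB_stop tok untok tok.length m (u-1) t ht]

-- ===== VERDICT (by name: the statement is the Claim_ definition above) =====
theorem match_tokenized_to_untokenized_py_spec : Claim_equal_match_tokenized_to_untokenized_py := by
  intro tok untok _
  unfold Spec_match_tokenized_to_untokenized_py
  unfold match_tokenized_to_untokenized_py match_tokenized_to_untokenized_py_alt
  rw [pv_both tok untok tok.length 1 0 PySem.Dict.empty (by omega) (by omega) (Or.inl rfl)]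
  norm_num
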